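-- pv_equiv track=rewrite | github.com/cjt0313/pyrmdp | scripts/visualize_evolution.py | _parse_atom_list
-- ===== SOURCE A (Python) =====
-- def _find_matching_paren(text: str, start: int) -> int:
--     """Given text[start] == '(', return the index of the matching ')'."""
--     depth = 0
--     for i in range(start, len(text)):
--         if text[i] == '(':
--             depth += 1
--         elif text[i] == ')':
--             depth -= 1
--             if depth == 0:
--                 return i
--     return len(text) - 1
--
-- def _parse_atom_list(block: str) -> tuple[list[str], list[str]]:
--     """Parse an (and ...) block into (positive_atoms, negative_atoms).
--
--     Each atom is a string like 'holding ?r ?m' or 'on-surface ?m ?s'.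
--     Reward/cost terms are excluded.
--     """
--     positive: list[str] = []
--     negative: list[str] = []
--     inner = block.strip()
--
--     # Strip outer parens and optional leading 'and'
--     if inner.startswith("(") and inner.endswith(")"):
--         content = inner[1:-1].strip()
--         if content.startswith("and"):
--             content = content[3:].strip()
--     else:
--         content = inner
--
--     i = 0
--     while i < len(content):
--         if content[i] == '(':
--             end = _find_matching_paren(content, i)
--             atom_str = content[i + 1:end].strip()
--
--             if atom_str.startswith("not "):
--                 # Negative literal: (not (pred ?args))
--                 neg_inner = atom_str[4:].strip()
--                 if neg_inner.startswith("(") and neg_inner.endswith(")"):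
--                     neg_atom = neg_inner[1:-1].strip()
--                     name = neg_atom.split()[0] if neg_atom else ""
--                     if name not in ("increase", "decrease"):
--                         negative.append(neg_atom)
--             else:
--                 name = atom_str.split()[0] if atom_str else ""
--                 if name not in ("and", "increase", "decrease", "probabilistic"):
--                     positive.append(atom_str)
--
--             i = end + 1
--         else:
--             i += 1
--
--     return positive, negative
-- ===== SOURCE B (Python) =====
-- def _skip_group(s, i):
--     """s[i] == '(': return the index just past this group's closing ')'."""
--     i += 1
--     while i < len(s):
--         if s[i] == ')':
--             return i + 1
--         if s[i] == '(':
--             i = _skip_group(s, i)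
--         else:
--             i += 1
--     return i
--
-- def _top_atoms(s, i):
--     """Raw texts of the top-level parenthesized groups of s[i:], recursively."""
--     while i < len(s) and s[i] != '(':
--         i += 1
--     if i >= len(s):
--         return []
--     j = _skip_group(s, i)
--     return [s[i + 1:j - 1].strip()] + _top_atoms(s, j)
--
-- def _neg_atom(a):
--     """The negated atom inside a 'not ...' term, or None if it is excluded."""
--     inner = a[4:].strip()
--     if inner.startswith("(") and inner.endswith(")"):
--         na = inner[1:-1].strip()
--         if (na.split()[0] if na else "") not in ("increase", "decrease"):
--             return na
--     return None
--
-- def _parse_atom_list(block: str) -> tuple[list[str], list[str]]: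
--     """Parse an (and ...) block into (positive_atoms, negative_atoms)."""
--     inner = block.strip()
--     if inner.startswith("(") and inner.endswith(")"):
--         content = inner[1:-1].strip()
--         if content.startswith("and"):
--             content = content[3:].strip()
--     else:
--         content = inner
--     atoms = _top_atoms(content, 0)
--     positive = [a for a in atoms
--                 if not a.startswith("not ")
--                 and (a.split()[0] if a else "") not in ("and", "increase", "decrease", "probabilistic")]
--     negative = [na for a in atoms if a.startswith("not ")
--                 for na in [_neg_atom(a)] if na is not None]
--     return positive, negative
-- ===== Notes on version B (the rewrite author's own statement) =====
-- stated objective: alternative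
-- what changed: Replaces A's flat index loop with an inline depth counter by a recursive-descent extraction (_skip_group recurses on nesting, _top_atoms recursively collects the raw top-level group texts) followed by two separate comprehension passes that filter the collected atoms into positive and negative lists, instead of classifying and appending inside the scanning loop.
import Mathlib
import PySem

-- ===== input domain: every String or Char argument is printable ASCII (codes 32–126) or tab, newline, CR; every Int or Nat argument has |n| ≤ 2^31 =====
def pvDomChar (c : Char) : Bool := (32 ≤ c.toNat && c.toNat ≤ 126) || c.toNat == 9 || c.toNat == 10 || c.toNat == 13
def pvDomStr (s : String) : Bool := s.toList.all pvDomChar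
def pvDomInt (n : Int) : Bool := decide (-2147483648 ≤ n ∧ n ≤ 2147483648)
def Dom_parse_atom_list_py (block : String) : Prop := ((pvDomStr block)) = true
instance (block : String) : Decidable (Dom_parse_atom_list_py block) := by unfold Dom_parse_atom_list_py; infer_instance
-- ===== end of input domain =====

-- B replaces A's flat scan with an inline depth counter by a recursive-descent extraction of the
-- top-level group texts followed by two filtering passes (same result; alternative decomposition).


-- Shared preprocessing (identical lines in both Pythons): strip the block, drop outer parens and a leading 'and'.
def pvContent (block : String) : List Char :=
  let inner := PySem.Chars.strip block.toList
  if PySem.Chars.startswith inner ['('] && PySem.Chars.endswith inner [')'] then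
    let c := PySem.Chars.strip (PySem.List.slice inner (some 1) (some (-1)))
    if PySem.Chars.startswith c "and".toList then PySem.Chars.strip (PySem.List.slice c (some 3) none) else c
  else inner

-- ===== PORT A =====
-- _find_matching_paren: the 'for i in range(start, len)' loop as structural recursion on the
-- remaining iteration count fuel = len - i (exact: the loop runs at most len - start times).
def pvFmpGo (text : List Char) : Nat → Nat → Int → Int
  | 0, _, _ => (text.length : Int) - 1
  | fuel + 1, i, depth =>
    if h : i < text.length then
      if text[i] = '(' then pvFmpGo text fuel (i + 1) (depth + 1)
      else if text[i] = ')' then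
        (if depth - 1 = 0 then (i : Int) else pvFmpGo text fuel (i + 1) (depth - 1))
      else pvFmpGo text fuel (i + 1) depth
    else (text.length : Int) - 1

def pvFmp (text : List Char) (start : Nat) : Int := pvFmpGo text (text.length - start) start 0

-- the classification block of A's while-loop body, factored as a helper
def pvAClassify (atomStr : List Char) (pos neg : List String) : List String × List String :=
  if PySem.Chars.startswith atomStr "not ".toList then
    let negInner := PySem.Chars.strip (PySem.List.slice atomStr (some 4) none)
    if PySem.Chars.startswith negInner ['('] && PySem.Chars.endswith negInner [')'] then
      let negAtom := PySem.Chars.strip (PySem.List.slice negInner (some 1) (some (-1)))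
      let name := if negAtom ≠ [] then (PySem.Chars.split₀ negAtom).headD [] else []
      if name = "increase".toList ∨ name = "decrease".toList then (pos, neg)
      else (pos, neg ++ [String.ofList negAtom])
    else (pos, neg)
  else
    let name := if atomStr ≠ [] then (PySem.Chars.split₀ atomStr).headD [] else []
    if name = "and".toList ∨ name = "increase".toList ∨ name = "decrease".toList ∨ name = "probabilistic".toList then (pos, neg)
    else (pos ++ [String.ofList atomStr], neg)

-- A's while loop; i is only ever 0 or end+1 ≥ 0, so it is kept as a Nat, and since i grows each
-- iteration the loop runs at most content.length times: fuel = content.length is exact.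
def pvALoop (content : List Char) : Nat → Nat → List String → List String → List String × List String
  | 0, _, pos, neg => (pos, neg)
  | fuel + 1, i, pos, neg =>
    if h : i < content.length then
      if content[i] = '(' then
        let e := pvFmp content i
        let st := pvAClassify (PySem.Chars.strip (PySem.List.slice content (some ((i : Int) + 1)) (some e))) pos neg
        pvALoop content fuel (e + 1).toNat st.1 st.2
      else pvALoop content fuel (i + 1) pos neg
    else (pos, neg)

def parse_atom_list_py (block : String) : List String × List String :=
  let content := pvContent block
  pvALoop content content.length 0 [] []

-- ===== PORT B =====
-- _skip_group: the recursion on nesting; fuel = s.length bounds the total number of steps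
-- (each call site advances the index, which never decreases).
def pvSkipAux (s : List Char) : Nat → Nat → Nat
  | 0, i => i
  | f + 1, i =>
    if h : i < s.length then
      if s[i] = ')' then i + 1
      else if s[i] = '(' then pvSkipAux s f (pvSkipAux s f (i + 1))
      else pvSkipAux s f (i + 1)
    else i

def pvSkipGroup (s : List Char) (i : Nat) : Nat := pvSkipAux s s.length (i + 1)

-- _top_atoms: skip to the next '(', take its group text, recurse past it
def pvTopAtoms (s : List Char) : Nat → Nat → List (List Char)
  | 0, _ => []
  | f + 1, i =>
    if h : i < s.length then
      if s[i] = '(' then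
        let j := pvSkipGroup s i
        PySem.Chars.strip (PySem.List.slice s (some ((i : Int) + 1)) (some ((j : Int) - 1))) :: pvTopAtoms s f j
      else pvTopAtoms s f (i + 1)
    else []

def pvHead (a : List Char) : List Char := if a ≠ [] then (PySem.Chars.split₀ a).headD [] else []

-- the positive-comprehension condition
def pvIsPos (a : List Char) : Bool :=
  !(PySem.Chars.startswith a "not ".toList) &&
  decide (pvHead a ≠ "and".toList ∧ pvHead a ≠ "increase".toList ∧
          pvHead a ≠ "decrease".toList ∧ pvHead a ≠ "probabilistic".toList)

-- the negative comprehension: 'not ' guard plus _neg_atom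
def pvNegOf (a : List Char) : Option (List Char) :=
  if PySem.Chars.startswith a "not ".toList then
    let inner := PySem.Chars.strip (PySem.List.slice a (some 4) none)
    if PySem.Chars.startswith inner ['('] && PySem.Chars.endswith inner [')'] then
      let na := PySem.Chars.strip (PySem.List.slice inner (some 1) (some (-1)))
      if pvHead na = "increase".toList ∨ pvHead na = "decrease".toList then none
      else some na
    else none
  else none

def parse_atom_list_py_alt (block : String) : List String × List String :=
  let content := pvContent block
  let atoms := pvTopAtoms content content.length 0
  ((atoms.filter pvIsPos).map String.ofList,
   atoms.filterMap (fun a => (pvNegOf a).map String.ofList))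

-- ===== PRECONDITION & SPEC =====
def Spec_parse_atom_list_py (block : String) (out : List String × List String) : Prop := out = parse_atom_list_py_alt block
instance (block : String) (out : List String × List String) : Decidable (Spec_parse_atom_list_py block out) := by unfold Spec_parse_atom_list_py; infer_instance

-- ===== CLAIM (what is proved, stated in full; the proofs are below) =====
def Claim_equal_parse_atom_list_py : Prop := ∀ (block : String), Dom_parse_atom_list_py block → Spec_parse_atom_list_py block (parse_atom_list_py block)

-- ===== LEMMAS AND PROOFS =====

-- canonical (exact-fuel) form of pvSkipAux, used only in the proofs
def pvSK (s : List Char) (i : Nat) : Nat := pvSkipAux s (s.length - i) i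

theorem pvSkipAux_ge (s : List Char) : ∀ f i, i ≤ pvSkipAux s f i := by
  intro f
  induction f with
  | zero => intro i; rw [pvSkipAux]
  | succ f ih =>
    intro i
    rw [pvSkipAux]
    split
    · split
      · omega
      · split
        · exact le_trans (by omega) (le_trans (ih (i+1)) (ih _))
        · exact le_trans (by omega) (ih (i+1))
    · exact le_rfl

theorem pvSkipAux_stable (s : List Char) :
    ∀ f g i, s.length ≤ f + i → s.length ≤ g + i → pvSkipAux s f i = pvSkipAux s g i := by
  intro f
  induction f with
  | zero =>
    intro g i h1 h2
    have hi : s.length ≤ i := by omega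
    rw [pvSkipAux]
    cases g with
    | zero => rw [pvSkipAux]
    | succ g => rw [pvSkipAux, dif_neg (by omega)]
  | succ f ih =>
    intro g i h1 h2
    by_cases hi : i < s.length
    · obtain ⟨g', rfl⟩ : ∃ g', g = g' + 1 := ⟨g - 1, by omega⟩
      rw [pvSkipAux, pvSkipAux, dif_pos hi, dif_pos hi]
      by_cases hc : s[i] = ')'
      · rw [if_pos hc, if_pos hc]
      · rw [if_neg hc, if_neg hc]
        by_cases ho : s[i] = '('
        · rw [if_pos ho, if_pos ho]
          have hinner : pvSkipAux s f (i + 1) = pvSkipAux s g' (i + 1) :=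
            ih g' (i + 1) (by omega) (by omega)
          have hge := pvSkipAux_ge s f (i + 1)
          rw [hinner] at hge ⊢
          exact ih g' _ (by omega) (by omega)
        · rw [if_neg ho, if_neg ho]
          exact ih g' (i + 1) (by omega) (by omega)
    · rw [pvSkipAux, dif_neg hi]
      cases g with
      | zero => rw [pvSkipAux]
      | succ g => rw [pvSkipAux, dif_neg hi]

theorem pvSkipAux_SK (s : List Char) (f i : Nat) (h : s.length ≤ f + i) :
    pvSkipAux s f i = pvSK s i := by
  exact pvSkipAux_stable s f (s.length - i) i h (by omega)

theorem pvFmpGo_ge (text : List Char) :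
    ∀ fuel i d, i ≤ text.length → text.length ≤ fuel + i → (i : Int) - 1 ≤ pvFmpGo text fuel i d := by
  intro fuel
  induction fuel with
  | zero =>
    intro i d h1 h2
    rw [pvFmpGo]; simp; omega
  | succ f ih =>
    intro i d h1 h2
    rw [pvFmpGo]
    split
    · split
      · have := ih (i + 1) (d + 1) (by omega) (by omega); push_cast at this ⊢; omega
      · split
        · split
          · omega
          · have := ih (i + 1) (d - 1) (by omega) (by omega); push_cast at this ⊢; omega
        · have := ih (i + 1) d (by omega) (by omega); push_cast at this ⊢; omega
    · simp; omega

theorem pvFmpGo_le (text : List Char) :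
    ∀ fuel i d, pvFmpGo text fuel i d ≤ (text.length : Int) - 1 := by
  intro fuel
  induction fuel with
  | zero => intro i d; rw [pvFmpGo]
  | succ f ih =>
    intro i d
    rw [pvFmpGo]
    split
    · split
      · exact ih _ _
      · split
        · split
          · omega
          · exact ih _ _
        · exact ih _ _
    · omega

-- depth-d scanning of A's helper = d-fold iteration of B's recursive skip
theorem pvLD (s : List Char) :
    ∀ n i, s.length - i = n → i ≤ s.length → ∀ d : Nat,
      pvFmpGo s n i ((d : Int) + 1) + 1 = ((pvSK s)^[d + 1] i : Nat) := by
  intro n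
  induction n with
  | zero =>
    intro i h hle d
    have hi : i = s.length := by omega
    have hfix : pvSK s i = i := by
      rw [pvSK, show s.length - i = 0 by omega, pvSkipAux]
    rw [Function.iterate_fixed hfix, pvFmpGo, hi]
    ring
  | succ n ih =>
    intro i h hle d
    have hi : i < s.length := by omega
    rw [pvFmpGo, dif_pos hi]
    by_cases ho : s[i] = '('
    · have hSK : pvSK s i = pvSK s (pvSK s (i + 1)) := by
        rw [pvSK, show s.length - i = n + 1 from h, pvSkipAux, dif_pos hi,
          if_neg (by simp [ho]), if_pos ho,
          pvSkipAux_SK s n (i + 1) (by omega)]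
        exact pvSkipAux_SK s n _ (le_trans (by omega) (Nat.add_le_add_left (pvSkipAux_ge s _ (i+1)) n))
      rw [if_pos ho]
      have hIH := ih (i + 1) (by omega) (by omega) (d + 1)
      push_cast at hIH ⊢
      rw [show (d : Int) + 1 + 1 = ((d : Int) + 1) + 1 by ring, hIH]
      have hit : (pvSK s)^[d + 1] i = (pvSK s)^[d + 1 + 1] (i + 1) := by
        rw [Function.iterate_succ_apply (pvSK s) d i, hSK,
          ← Function.iterate_succ_apply (pvSK s) d (pvSK s (i + 1)),
          ← Function.iterate_succ_apply (pvSK s) (d + 1) (i + 1)]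
      rw [hit]
    · by_cases hc : s[i] = ')'
      · have hSK : pvSK s i = i + 1 := by
          rw [pvSK, show s.length - i = n + 1 from h, pvSkipAux, dif_pos hi, if_pos hc]
        rw [if_neg (by simp [ho]), if_pos hc]
        cases d with
        | zero =>
          rw [if_pos (by ring)]
          rw [Function.iterate_one, hSK]; push_cast; ring
        | succ d' =>
          rw [if_neg (by push_cast; omega)]
          have hIH := ih (i + 1) (by omega) (by omega) d'
          push_cast at hIH ⊢
          rw [show (d' : Int) + 1 + 1 - 1 = (d' : Int) + 1 by ring, hIH,
            show d' + 1 + 1 = (d' + 1) + 1 from rfl,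
            Function.iterate_succ_apply (pvSK s) (d' + 1) i, hSK]
      · have hSK : pvSK s i = pvSK s (i + 1) := by
          rw [pvSK, show s.length - i = n + 1 from h, pvSkipAux, dif_pos hi, if_neg hc, if_neg ho]
          exact pvSkipAux_SK s n (i + 1) (by omega)
        rw [if_neg (by simp [ho]), if_neg hc]
        have hIH := ih (i + 1) (by omega) (by omega) d
        rw [hIH, Function.iterate_succ_apply (pvSK s) d i, hSK,
          ← Function.iterate_succ_apply (pvSK s) d (i + 1)]

theorem pvALoop_stop (content : List Char) (fuel i : Nat) (pos neg : List String)
    (h : content.length ≤ i) : pvALoop content fuel i pos neg = (pos, neg) := by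
  cases fuel with
  | zero => rw [pvALoop]
  | succ f => rw [pvALoop, dif_neg (by omega)]

theorem pvTopAtoms_stop (s : List Char) (fuel i : Nat) (h : s.length ≤ i) :
    pvTopAtoms s fuel i = [] := by
  cases fuel with
  | zero => rw [pvTopAtoms]
  | succ f => rw [pvTopAtoms, dif_neg (by omega)]

-- B's two comprehensions, as functions of the collected atom list (proof-side abbreviations)
def pvPos (ats : List (List Char)) : List String := (ats.filter pvIsPos).map String.ofList
def pvNeg (ats : List (List Char)) : List String := ats.filterMap (fun a => (pvNegOf a).map String.ofList)

theorem pvClass_eq (atom : List Char) (pos neg : List String) :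
    pvAClassify atom pos neg =
      (pos ++ (if pvIsPos atom then [String.ofList atom] else []),
       neg ++ ((pvNegOf atom).map String.ofList).toList) := by
  by_cases hn : PySem.Chars.startswith atom "not ".toList
  · simp only [pvAClassify, pvNegOf, pvIsPos, pvHead, hn,
      Bool.not_true, Bool.false_and]
    split_ifs <;> simp_all
  · simp only [pvAClassify, pvNegOf, pvIsPos, pvHead,
      eq_false_of_ne_true hn, Bool.not_false, Bool.true_and]
    split_ifs with h <;> simp_all

theorem pvPos_cons (a : List Char) (r : List (List Char)) :
    pvPos (a :: r) = (if pvIsPos a then [String.ofList a] else []) ++ pvPos r := by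
  simp [pvPos, List.filter_cons]; split <;> simp

theorem pvNeg_cons (a : List Char) (r : List (List Char)) :
    pvNeg (a :: r) = ((pvNegOf a).map String.ofList).toList ++ pvNeg r := by
  simp [pvNeg, List.filterMap_cons]; cases pvNegOf a <;> simp

theorem pvMain (s : List Char) :
    ∀ n i, s.length - i ≤ n → i ≤ s.length → ∀ (pos neg : List String) (fA fB : Nat),
      s.length ≤ fA + i → s.length ≤ fB + i →
      pvALoop s fA i pos neg = (pos ++ pvPos (pvTopAtoms s fB i), neg ++ pvNeg (pvTopAtoms s fB i)) := by
  intro n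
  induction n with
  | zero =>
    intro i hni hle pos neg fA fB hfA hfB
    rw [pvALoop_stop s fA i pos neg (by omega), pvTopAtoms_stop s fB i (by omega)]
    simp [pvPos, pvNeg]
  | succ n ih =>
    intro i hni hle pos neg fA fB hfA hfB
    by_cases hi : i < s.length
    · obtain ⟨a, rfl⟩ : ∃ a, fA = a + 1 := ⟨fA - 1, by omega⟩
      obtain ⟨b, rfl⟩ : ∃ b, fB = b + 1 := ⟨fB - 1, by omega⟩
      rw [pvALoop, pvTopAtoms, dif_pos hi, dif_pos hi]
      by_cases ho : s[i] = '('
      · rw [if_pos ho, if_pos ho]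
        have hj : pvSkipGroup s i = pvSK s (i + 1) :=
          pvSkipAux_SK s s.length (i + 1) (by omega)
        have he : pvFmp s i = pvFmpGo s (s.length - (i + 1)) (i + 1) 1 := by
          rw [pvFmp, show s.length - i = (s.length - (i + 1)) + 1 by omega, pvFmpGo,
            dif_pos hi, if_pos ho]
          norm_num
        have he1 : pvFmp s i + 1 = ((pvSK s (i + 1) : Nat) : Int) := by
          rw [he]
          have := pvLD s (s.length - (i + 1)) (i + 1) rfl (by omega) 0
          simpa using this
        have hgelo : (i : Int) ≤ pvFmp s i := by
          rw [he]
          have := pvFmpGo_ge s (s.length - (i + 1)) (i + 1) 1 (by omega) (by omega)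
          push_cast at this ⊢; omega
        have hhi : pvFmp s i ≤ (s.length : Int) - 1 := by rw [he]; exact pvFmpGo_le s _ _ _
        have hje : (pvSkipGroup s i : Int) = pvFmp s i + 1 := by rw [hj, ← he1]
        have htn : (pvFmp s i + 1).toNat = pvSkipGroup s i := by omega
        have hslice : (pvSkipGroup s i : Int) - 1 = pvFmp s i := by omega
        have hjlo : i + 1 ≤ pvSkipGroup s i := by omega
        have hjhile : pvSkipGroup s i ≤ s.length := by omega
        simp only [hslice, htn, pvClass_eq, pvPos_cons, pvNeg_cons]
        rw [ih (pvSkipGroup s i) (by omega) (by omega) _ _ a b (by omega) (by omega)]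
        simp [List.append_assoc]
      · rw [if_neg ho, if_neg ho]
        exact ih (i + 1) (by omega) (by omega) pos neg a b (by omega) (by omega)
    · rw [pvALoop_stop s _ i pos neg (by omega), pvTopAtoms_stop s _ i (by omega)]
      simp [pvPos, pvNeg]

-- ===== VERDICT (by name: the statement is the Claim_ definition above) =====
theorem parse_atom_list_py_spec : Claim_equal_parse_atom_list_py := by
  intro block _
  unfold Spec_parse_atom_list_py parse_atom_list_py parse_atom_list_py_alt
  have h := pvMain (pvContent block) (pvContent block).length 0 (by omega) (by omega) [] []
      (pvContent block).length (pvContent block).length (by omega) (by omega)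
  simpa [pvPos, pvNeg] using h
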